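-- pv_equiv track=rewrite | github.com/Cz0210/Counterfactual-Subgraph | src/eval/fragment_quality.py | _detect_jsonl_source_kind
-- ===== SOURCE A (Python) =====
-- from collections.abc import Iterable, Sequence
-- from typing import Any
--
-- _GENERATED_FIELDS = (
--     "generated_fragment",
--     "prediction",
--     "predicted_fragment",
--     "generated_smiles",
--     "fragment_prediction",
--     "completion_smiles",
--     "model_fragment",
-- )
--
-- def _detect_jsonl_source_kind(rows: Sequence[dict[str, Any]]) -> str:
--     if not rows:
--         return "empty_jsonl"
--     if any(
--         any(field in row for field in _GENERATED_FIELDS) or "raw_generation" in row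
--         for row in rows
--     ):
--         return "sft_inference_jsonl"
--     if any("instruction" in row and "output" in row for row in rows):
--         return "sft_dataset_jsonl"
--     return "generic_jsonl"
-- ===== SOURCE B (Python) =====
-- _GENERATED_FIELDS = (
--     "generated_fragment",
--     "prediction",
--     "predicted_fragment",
--     "generated_smiles",
--     "fragment_prediction",
--     "completion_smiles",
--     "model_fragment",
-- )
--
-- _GEN_KEYS = set(_GENERATED_FIELDS) | {"raw_generation"}
--
-- def _detect_jsonl_source_kind(rows):
--     if not rows:
--         return "empty_jsonl"
--     has_sft = False
--     for row in rows:
--         if not _GEN_KEYS.isdisjoint(row):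
--             return "sft_inference_jsonl"
--         if "instruction" in row and "output" in row:
--             has_sft = True
--     return "sft_dataset_jsonl" if has_sft else "generic_jsonl"
-- ===== Notes on version B (the rewrite author's own statement) =====
-- stated objective: simpler
-- what changed: Replaces A's three independent any() scans over rows with one single pass that returns immediately on a generated/raw_generation key (top priority) and accumulates a has_sft flag, classifying after the loop; generated-key detection uses one precomputed set-disjointness test instead of a nested scan over the field tuple.
import Mathlib
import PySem

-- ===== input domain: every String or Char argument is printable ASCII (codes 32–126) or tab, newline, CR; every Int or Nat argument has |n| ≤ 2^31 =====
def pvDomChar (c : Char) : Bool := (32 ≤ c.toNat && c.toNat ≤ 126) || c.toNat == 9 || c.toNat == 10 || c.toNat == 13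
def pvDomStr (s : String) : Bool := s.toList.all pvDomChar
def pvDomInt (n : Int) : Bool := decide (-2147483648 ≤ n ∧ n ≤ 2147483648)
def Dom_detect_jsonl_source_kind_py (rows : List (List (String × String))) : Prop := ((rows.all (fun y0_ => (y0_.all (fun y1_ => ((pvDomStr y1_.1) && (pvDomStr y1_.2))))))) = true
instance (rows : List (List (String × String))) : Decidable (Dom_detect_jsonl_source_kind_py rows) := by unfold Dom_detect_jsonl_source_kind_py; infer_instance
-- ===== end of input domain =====

-- B is a single pass with an early return and an accumulated flag, instead of A's three any() scans (objective: simpler).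

-- ===== PORT A =====
def pvGeneratedFields : List String :=
  ["generated_fragment", "prediction", "predicted_fragment", "generated_smiles",
   "fragment_prediction", "completion_smiles", "model_fragment"]

def detect_jsonl_source_kind_py (rows : List (List (String × String))) : String :=
  if rows = [] then "empty_jsonl"
  else if rows.any (fun row =>
      pvGeneratedFields.any (fun f => row.any (fun kv => kv.1 == f))
        || row.any (fun kv => kv.1 == "raw_generation")) then "sft_inference_jsonl"
  else if rows.any (fun row =>
      row.any (fun kv => kv.1 == "instruction") && row.any (fun kv => kv.1 == "output")) then
    "sft_dataset_jsonl"
  else "generic_jsonl"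

-- ===== PORT B =====
-- set(_GENERATED_FIELDS) | {"raw_generation"}
def pvGenKeys : PySem.Set String :=
  PySem.Set.union (PySem.Set.ofList pvGeneratedFields) (PySem.Set.ofList ["raw_generation"])

def pvAltLoop : List (List (String × String)) → Bool → String
  | [], hasSft => if hasSft then "sft_dataset_jsonl" else "generic_jsonl"
  | row :: rest, hasSft =>
    if !PySem.Set.isdisjoint pvGenKeys (row.map Prod.fst) then "sft_inference_jsonl"
    else pvAltLoop rest (hasSft || (row.any (fun kv => kv.1 == "instruction")
                                     && row.any (fun kv => kv.1 == "output")))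

def detect_jsonl_source_kind_py_alt (rows : List (List (String × String))) : String :=
  if rows = [] then "empty_jsonl" else pvAltLoop rows false
-- ===== PRECONDITION & SPEC =====
def Spec_detect_jsonl_source_kind_py (rows : List (List (String × String))) (out : String) : Prop := out = detect_jsonl_source_kind_py_alt rows
instance (rows : List (List (String × String))) (out : String) : Decidable (Spec_detect_jsonl_source_kind_py rows out) := by unfold Spec_detect_jsonl_source_kind_py; infer_instance

-- ===== CLAIM (what is proved, stated in full; the proofs are below) =====
def Claim_equal_detect_jsonl_source_kind_py : Prop := ∀ (rows : List (List (String × String))), Dom_detect_jsonl_source_kind_py rows → Spec_detect_jsonl_source_kind_py rows (detect_jsonl_source_kind_py rows)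

-- ===== LEMMAS AND PROOFS =====

lemma pv_mem_genkeys (x : String) :
    x ∈ pvGenKeys ↔ x ∈ pvGeneratedFields ∨ x = "raw_generation" := by
  simp [pvGenKeys, PySem.Set.mem_union, PySem.Set.mem_ofList]

lemma pv_row_gen (row : List (String × String)) :
    (!PySem.Set.isdisjoint pvGenKeys (row.map Prod.fst))
      = (pvGeneratedFields.any (fun f => row.any (fun kv => kv.1 == f))
          || row.any (fun kv => kv.1 == "raw_generation")) := by
  rw [Bool.eq_iff_iff, Bool.not_eq_true']
  constructor
  · intro h
    have h' : ¬ (PySem.Set.isdisjoint pvGenKeys (row.map Prod.fst) = true) := by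
      simp [h]
    rw [PySem.Set.isdisjoint_iff] at h'
    push_neg at h'
    obtain ⟨x, hxs, hxt⟩ := h'
    obtain ⟨kv, hkv, hfst⟩ := List.mem_map.1 hxt
    rcases (pv_mem_genkeys x).1 hxs with hf | hr
    · simp only [Bool.or_eq_true, List.any_eq_true, beq_iff_eq]
      exact Or.inl ⟨x, hf, kv, hkv, hfst⟩
    · simp only [Bool.or_eq_true, List.any_eq_true, beq_iff_eq]
      exact Or.inr ⟨kv, hkv, by rw [hfst, hr]⟩
  · intro h
    have h' : ∃ x ∈ pvGenKeys, x ∈ row.map Prod.fst := by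
      simp only [Bool.or_eq_true, List.any_eq_true, beq_iff_eq] at h
      rcases h with ⟨f, hf, kv, hkv, hfe⟩ | ⟨kv, hkv, hkr⟩
      · exact ⟨f, (pv_mem_genkeys f).2 (Or.inl hf), List.mem_map.2 ⟨kv, hkv, hfe⟩⟩
      · exact ⟨"raw_generation", (pv_mem_genkeys _).2 (Or.inr rfl),
          List.mem_map.2 ⟨kv, hkv, hkr⟩⟩
    obtain ⟨x, hxs, hxt⟩ := h'
    by_contra hd
    have := (PySem.Set.isdisjoint_iff _ _).1 (by
      cases hdj : PySem.Set.isdisjoint pvGenKeys (row.map Prod.fst)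
      · exact absurd hdj hd
      · rfl) x hxs
    exact this hxt

lemma pv_loop_char (rows : List (List (String × String))) (hasSft : Bool) :
    pvAltLoop rows hasSft
      = (if rows.any (fun row => !PySem.Set.isdisjoint pvGenKeys (row.map Prod.fst)) then
           "sft_inference_jsonl"
         else if hasSft || rows.any (fun row =>
            row.any (fun kv => kv.1 == "instruction") && row.any (fun kv => kv.1 == "output")) then
           "sft_dataset_jsonl"
         else "generic_jsonl") := by
  induction rows generalizing hasSft with
  | nil => simp [pvAltLoop]
  | cons row rest ih =>
    simp only [pvAltLoop, List.any_cons]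
    by_cases h : (!PySem.Set.isdisjoint pvGenKeys (row.map Prod.fst)) = true
    · simp [h]
    · rw [ih]
      simp only [Bool.not_eq_true] at h
      simp only [h, Bool.false_or, Bool.or_assoc]
      rfl

-- ===== VERDICT (by name: the statement is the Claim_ definition above) =====
theorem detect_jsonl_source_kind_py_spec : Claim_equal_detect_jsonl_source_kind_py := by
  intro rows _
  unfold Spec_detect_jsonl_source_kind_py detect_jsonl_source_kind_py detect_jsonl_source_kind_py_alt
  by_cases hnil : rows = []
  · simp [hnil]
  · rw [if_neg hnil, if_neg hnil, pv_loop_char]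
    have hcong : rows.any (fun row => !PySem.Set.isdisjoint pvGenKeys (row.map Prod.fst))
        = rows.any (fun row =>
            pvGeneratedFields.any (fun f => row.any (fun kv => kv.1 == f))
              || row.any (fun kv => kv.1 == "raw_generation")) :=
      congrArg rows.any (funext fun row => pv_row_gen row)
    rw [hcong]
    rfl
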